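-- pv_equiv track=rewrite | github.com/sandroGAZZO/python-project | M2/Apprentissage autonome/SOSI-Puissance4-ML-master/minimax.py | check
-- ===== SOURCE A (Python) =====
-- def check(feld, sp, anz):
--     breite = len(feld[0])
--     hoehe = len(feld)
--     ret = 0
--
--     #waagerecht
--     for i in range(hoehe):
--         tmp = 0
--         for j in range(breite):
--             if feld[i][j]==sp:
--                 tmp = tmp + 1
--             else:
--                 tmp = 0
--             if tmp>=anz:
--                     ret = ret + 1
--     #senkrecht
--     for i in range(breite):
--         tmp = 0
--         for j in range(hoehe):
--             if feld[j][i]==sp: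
--                 tmp = tmp + 1
--             else:
--                 tmp = 0
--             if tmp>=anz:
--                     ret = ret + 1
--
--     #schräg rechts hoch
--
--     sub=anz-1
--     for i in range(hoehe-1,sub-1,-1):
--         for j in range(0,breite-sub,1):
--             tmp = 0
--             for t in range(anz):
--                 if(feld[i-t][j+t]==sp): tmp = tmp+1
--             if tmp == anz: ret = ret + 1
--
--     #schräg links
--     for i in range(hoehe-1,sub-1,-1):
--         for j in range(breite-1,sub-1,-1):
--             tmp = 0
--             for t in range(anz):
--                 if(feld[i-t][j-t]==sp): tmp = tmp+1
--             if tmp == anz: ret = ret + 1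
--
--     return ret
-- ===== SOURCE B (Python) =====
-- def check(feld, sp, anz):
--     w = len(feld[0])
--     v = [0] * w    # vertical run ending in the previous row, per column
--     dr = [0] * w   # up-right diagonal run ending in the previous row
--     dl = [0] * w   # up-left diagonal run ending in the previous row
--     total = 0
--     for row in feld:
--         nv = []
--         ndr = []
--         ndl = []
--         run = 0
--         for j in range(w):
--             if row[j] == sp:
--                 run = run + 1
--                 a = v[j] + 1
--                 b = dr[j + 1] + 1 if j + 1 < w else 1
--                 c = dl[j - 1] + 1 if j >= 1 else 1
--             else:
--                 run = 0
--                 a = 0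
--                 b = 0
--                 c = 0
--             nv.append(a)
--             ndr.append(b)
--             ndl.append(c)
--             if run >= anz:
--                 total += 1
--             if a >= anz:
--                 total += 1
--             if b >= anz:
--                 total += 1
--             if c >= anz:
--                 total += 1
--         v, dr, dl = nv, ndr, ndl
--     return total
-- ===== Notes on version B (the rewrite author's own statement) =====
-- stated objective: alternative
-- what changed: A makes four separate passes and re-scans each length-anz diagonal window with an inner loop; B makes a single top-to-bottom sweep that carries running-streak lengths for all four directions (per-column arrays for the vertical and the two diagonals) and counts a cell whenever a streak reaches anz, removing the O(anz) inner window scan (same measured speed at the generated sizes).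
-- outside the precondition, e.g. on check([[1]], 1, 0): A returns 10, B returns 4; on check([[1, 1], [1, 1]], 1, -1): A returns 8, B returns 16
import Mathlib
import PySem

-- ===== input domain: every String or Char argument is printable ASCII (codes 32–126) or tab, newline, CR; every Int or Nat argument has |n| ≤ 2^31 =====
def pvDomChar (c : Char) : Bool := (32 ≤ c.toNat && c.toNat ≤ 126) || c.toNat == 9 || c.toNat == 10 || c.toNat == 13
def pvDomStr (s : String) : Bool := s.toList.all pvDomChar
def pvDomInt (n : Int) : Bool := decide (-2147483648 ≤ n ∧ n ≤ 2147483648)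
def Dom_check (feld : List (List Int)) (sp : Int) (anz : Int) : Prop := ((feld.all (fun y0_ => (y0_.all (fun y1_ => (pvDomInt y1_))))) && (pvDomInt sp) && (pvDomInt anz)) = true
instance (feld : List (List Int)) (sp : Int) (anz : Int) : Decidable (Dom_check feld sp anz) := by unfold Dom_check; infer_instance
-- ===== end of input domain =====

-- B replaces A's four passes (with an O(anz) rescan of every diagonal window) by one
-- top-to-bottom sweep carrying running-streak lengths for all four directions (objective: alternative).

-- ===== PORT A =====
def check (feld : List (List Int)) (sp : Int) (anz : Int) : Int :=
  let breite : Int := PySem.List.len (PySem.List.pyGetD feld 0 [])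
  let hoehe : Int := PySem.List.len feld
  -- waagerecht
  let ret1 : Int := (PySem.List.pyRange 0 hoehe 1).foldl (fun ret i =>
    ((PySem.List.pyRange 0 breite 1).foldl (fun (st : Int × Int) j =>
        let tmp : Int := if PySem.List.pyGetD (PySem.List.pyGetD feld i []) j 0 = sp then st.1 + 1 else 0
        (tmp, if tmp ≥ anz then st.2 + 1 else st.2)) (0, ret)).2) 0
  -- senkrecht
  let ret2 : Int := (PySem.List.pyRange 0 breite 1).foldl (fun ret i =>
    ((PySem.List.pyRange 0 hoehe 1).foldl (fun (st : Int × Int) j =>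
        let tmp : Int := if PySem.List.pyGetD (PySem.List.pyGetD feld j []) i 0 = sp then st.1 + 1 else 0
        (tmp, if tmp ≥ anz then st.2 + 1 else st.2)) (0, ret)).2) ret1
  -- schräg rechts hoch
  let sub : Int := anz - 1
  let ret3 : Int := (PySem.List.pyRange (hoehe - 1) (sub - 1) (-1)).foldl (fun ret i =>
    (PySem.List.pyRange 0 (breite - sub) 1).foldl (fun ret j =>
      let tmp : Int := (PySem.List.pyRange 0 anz 1).foldl (fun tmp t =>
        if PySem.List.pyGetD (PySem.List.pyGetD feld (i - t) []) (j + t) 0 = sp then tmp + 1 else tmp) 0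
      if tmp = anz then ret + 1 else ret) ret) ret2
  -- schräg links
  let ret4 : Int := (PySem.List.pyRange (hoehe - 1) (sub - 1) (-1)).foldl (fun ret i =>
    (PySem.List.pyRange (breite - 1) (sub - 1) (-1)).foldl (fun ret j =>
      let tmp : Int := (PySem.List.pyRange 0 anz 1).foldl (fun tmp t =>
        if PySem.List.pyGetD (PySem.List.pyGetD feld (i - t) []) (j - t) 0 = sp then tmp + 1 else tmp) 0
      if tmp = anz then ret + 1 else ret) ret) ret3
  ret4

-- ===== PORT B =====
def check_alt (feld : List (List Int)) (sp : Int) (anz : Int) : Int :=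
  let w : Int := PySem.List.len (PySem.List.pyGetD feld 0 [])
  let zeros : List Int := List.replicate w.toNat 0
  (feld.foldl (fun (st : (List Int × List Int × List Int) × Int) row =>
      let v := st.1.1
      let dr := st.1.2.1
      let dl := st.1.2.2
      let inner := (PySem.List.pyRange 0 w 1).foldl
        (fun (q : (List Int × List Int × List Int) × Int × Int) j =>
          let run : Int := q.2.1
          let abc : Int × Int × Int × Int :=
            if PySem.List.pyGetD row j 0 = sp then
              (run + 1, PySem.List.pyGetD v j 0 + 1,
               if j + 1 < w then PySem.List.pyGetD dr (j + 1) 0 + 1 else 1,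
               if j ≥ 1 then PySem.List.pyGetD dl (j - 1) 0 + 1 else 1)
            else (0, 0, 0, 0)
          let t1 : Int := if abc.1 ≥ anz then q.2.2 + 1 else q.2.2
          let t2 : Int := if abc.2.1 ≥ anz then t1 + 1 else t1
          let t3 : Int := if abc.2.2.1 ≥ anz then t2 + 1 else t2
          let t4 : Int := if abc.2.2.2 ≥ anz then t3 + 1 else t3
          ((q.1.1 ++ [abc.2.1], q.1.2.1 ++ [abc.2.2.1], q.1.2.2 ++ [abc.2.2.2]), abc.1, t4))
        (([], [], []), 0, st.2)
      (inner.1, inner.2.2))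
    ((zeros, zeros, zeros), 0)).2

-- ===== PRECONDITION & SPEC =====
-- Pre_ excludes: feld = [] and boards with a row shorter than row 0 (A raises IndexError there),
-- and anz ≤ 0 (outside the natural domain — a winning-line length must be positive; A's degenerate
-- zero-length-window counts there are not meaningful, see the cites).
def Pre_check (feld : List (List Int)) (sp : Int) (anz : Int) : Prop :=
  feld ≠ [] ∧ 1 ≤ anz ∧ ∀ row ∈ feld, (feld.headD []).length ≤ row.length
instance (feld : List (List Int)) (sp : Int) (anz : Int) : Decidable (Pre_check feld sp anz) := by
  unfold Pre_check; infer_instance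

def pvWitness_check : List (List Int) × Int × Int := ([[1, 0, 1], [0, 1, 1]], 1, 2)

def Spec_check (feld : List (List Int)) (sp : Int) (anz : Int) (out : Int) : Prop := out = check_alt feld sp anz
instance (feld : List (List Int)) (sp : Int) (anz : Int) (out : Int) : Decidable (Spec_check feld sp anz out) := by unfold Spec_check; infer_instance

-- ===== CLAIM (what is proved, stated in full; the proofs are below) =====
def Claim_equal_check : Prop := ∀ (feld : List (List Int)) (sp : Int) (anz : Int), Dom_check feld sp anz → Pre_check feld sp anz → Spec_check feld sp anz (check feld sp anz)

-- ===== LEMMAS AND PROOFS =====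


-- cell value of the board at Nat coordinates (out of range reads 0, like the ports' getD)
def pvCell (feld : List (List Int)) (i j : Nat) : Int := (feld.getD i []).getD j 0

-- running streak of `sp` along a value sequence f, after n elements
def pvR (sp : Int) (f : Nat → Int) : Nat → Int
  | 0 => 0
  | n + 1 => if f n = sp then pvR sp f n + 1 else 0

-- vertical / up-right / up-left diagonal streaks ending in row n-1 (n = rows processed)
def pvV (feld : List (List Int)) (sp : Int) : Nat → Nat → Int
  | 0, _ => 0
  | n + 1, j => if pvCell feld n j = sp then pvV feld sp n j + 1 else 0

def pvDR (feld : List (List Int)) (sp : Int) (W : Nat) : Nat → Nat → Int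
  | 0, _ => 0
  | n + 1, j => if pvCell feld n j = sp then (if j + 1 < W then pvDR feld sp W n (j + 1) + 1 else 1) else 0

def pvDL (feld : List (List Int)) (sp : Int) : Nat → Nat → Int
  | 0, _ => 0
  | n + 1, j => if pvCell feld n j = sp then (if 1 ≤ j then pvDL feld sp n (j - 1) + 1 else 1) else 0

def pvInd (anz x : Int) : Int := if x ≥ anz then 1 else 0

-- the common value: per-cell indicators of streaks reaching anz, in all four directions
def pvT (feld : List (List Int)) (sp anz : Int) (h W : Nat) : Int :=
  ∑ i ∈ Finset.range h, ∑ j ∈ Finset.range W,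
    (pvInd anz (pvR sp (pvCell feld i) (j + 1)) + pvInd anz (pvV feld sp (i + 1) j)
      + pvInd anz (pvDR feld sp W (i + 1) j) + pvInd anz (pvDL feld sp (i + 1) j))

lemma pvSumRange (n : Nat) (f : Nat → Int) : ((List.range n).map f).sum = ∑ i ∈ Finset.range n, f i := rfl

-- streak fold over range n: state is (current streak, count of positions whose streak reached anz)
lemma pvStreak (sp anz : Int) (g : Int → Int) (n : Nat) : ∀ (c : Int),
    (PySem.List.pyRange 0 (n : Int) 1).foldl
      (fun (st : Int × Int) j =>
        let tmp : Int := if g j = sp then st.1 + 1 else 0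
        (tmp, if tmp ≥ anz then st.2 + 1 else st.2)) (0, c)
    = (pvR sp (fun k => g (k : Int)) n,
       c + ∑ p ∈ Finset.range n, pvInd anz (pvR sp (fun k => g (k : Int)) (p + 1))) := by
  induction n with
  | zero => intro c; simp [PySem.List.pyRange_one_eq_nil, pvR]
  | succ n ih =>
    intro c
    rw [show ((n + 1 : Nat) : Int) = (n : Int) + 1 by push_cast; ring,
      PySem.List.pyRange_one_succ_right (by positivity), List.foldl_append, ih c]
    simp only [List.foldl_cons, List.foldl_nil, Finset.sum_range_succ]
    by_cases hg : g (n : Int) = sp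
    · by_cases h2 : pvR sp (fun k => g (k : Int)) n + 1 ≥ anz
      · simp [pvR, pvInd, hg, h2]; ring
      · simp [pvR, pvInd, hg, h2]
    · by_cases h0 : (0 : Int) ≥ anz
      · simp [pvR, pvInd, hg, h0]; ring
      · simp [pvR, pvInd, hg, h0]


lemma pvSumAsc (G : Int → Int) (a b : Int) :
    ((PySem.List.pyRange a b 1).map G).sum = ∑ k ∈ Finset.range (b - a).toNat, G (a + (k : Int)) := by
  rw [PySem.List.pyRange_one, List.map_map, ← pvSumRange]
  rfl

lemma pvA1 (feld : List (List Int)) (sp anz : Int) (h W : Nat) (r : Int) :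
    (PySem.List.pyRange 0 (h : Int) 1).foldl (fun ret i =>
      ((PySem.List.pyRange 0 (W : Int) 1).foldl (fun (st : Int × Int) j =>
          let tmp : Int := if PySem.List.pyGetD (PySem.List.pyGetD feld i []) j 0 = sp then st.1 + 1 else 0
          (tmp, if tmp ≥ anz then st.2 + 1 else st.2)) (0, ret)).2) r
    = r + ∑ i ∈ Finset.range h, ∑ j ∈ Finset.range W, pvInd anz (pvR sp (pvCell feld i) (j + 1)) := by
  rw [PySem.List.foldl_congr_mem (g := fun ret i => ret +
        ∑ p ∈ Finset.range W, pvInd anz (pvR sp (pvCell feld i.toNat) (p + 1)))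
      (init := r)]
  · rw [PySem.List.foldl_add, pvSumAsc]
    simp
  · intro acc x hx
    have hx' : 0 ≤ x := (PySem.List.mem_pyRange_one.mp hx).1
    obtain ⟨n, rfl⟩ := Int.eq_ofNat_of_zero_le hx'
    rw [pvStreak sp anz (fun j => PySem.List.pyGetD (PySem.List.pyGetD feld (n : Int) []) j 0) W acc]
    have hfun : (fun k : Nat => PySem.List.pyGetD (PySem.List.pyGetD feld (n : Int) []) (k : Int) 0) = pvCell feld n := by
      funext k
      simp [pvCell, PySem.List.pyGetD_natCast, List.getD]
    dsimp only
    rw [hfun]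
    simp
lemma pvV_eq (feld : List (List Int)) (sp : Int) (n j : Nat) :
    pvV feld sp n j = pvR sp (fun i' => pvCell feld i' j) n := by
  induction n with
  | zero => rfl
  | succ n ih => simp [pvV, pvR, ih]

lemma pvA2 (feld : List (List Int)) (sp anz : Int) (h W : Nat) (r : Int) :
    (PySem.List.pyRange 0 (W : Int) 1).foldl (fun ret i =>
      ((PySem.List.pyRange 0 (h : Int) 1).foldl (fun (st : Int × Int) j =>
          let tmp : Int := if PySem.List.pyGetD (PySem.List.pyGetD feld j []) i 0 = sp then st.1 + 1 else 0
          (tmp, if tmp ≥ anz then st.2 + 1 else st.2)) (0, ret)).2) r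
    = r + ∑ j ∈ Finset.range W, ∑ i ∈ Finset.range h, pvInd anz (pvV feld sp (i + 1) j) := by
  rw [PySem.List.foldl_congr_mem (g := fun ret i => ret +
        ∑ p ∈ Finset.range h, pvInd anz (pvV feld sp (p + 1) i.toNat))
      (init := r)]
  · rw [PySem.List.foldl_add, pvSumAsc]
    simp
  · intro acc x hx
    have hx' : 0 ≤ x := (PySem.List.mem_pyRange_one.mp hx).1
    obtain ⟨n, rfl⟩ := Int.eq_ofNat_of_zero_le hx'
    rw [pvStreak sp anz (fun j => PySem.List.pyGetD (PySem.List.pyGetD feld j []) (n : Int) 0) h acc]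
    have hfun : (fun k : Nat => PySem.List.pyGetD (PySem.List.pyGetD feld (k : Int) []) (n : Int) 0) = fun k => pvCell feld k n := by
      funext k
      simp [pvCell, PySem.List.pyGetD_natCast, List.getD]
    dsimp only
    rw [hfun]
    simp [pvV_eq]

lemma pvDR_nonneg (feld : List (List Int)) (sp : Int) (W : Nat) : ∀ n j, 0 ≤ pvDR feld sp W n j := by
  intro n
  induction n with
  | zero => intro j; simp [pvDR]
  | succ n ih =>
    intro j
    simp only [pvDR]
    split_ifs with h1 h2
    · have := ih (j + 1); omega
    · omega
    · omega

lemma pvDL_nonneg (feld : List (List Int)) (sp : Int) : ∀ n j, 0 ≤ pvDL feld sp n j := by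
  intro n
  induction n with
  | zero => intro j; simp [pvDL]
  | succ n ih =>
    intro j
    simp only [pvDL]
    split_ifs with h1 h2
    · have := ih (j - 1); omega
    · omega
    · omega

lemma pvDR_zero (feld : List (List Int)) (sp : Int) (W j : Nat) : pvDR feld sp W 0 j = 0 := rfl
lemma pvDL_zero (feld : List (List Int)) (sp : Int) (j : Nat) : pvDL feld sp 0 j = 0 := rfl

lemma pvDR_succ (feld : List (List Int)) (sp : Int) (W n j : Nat) :
    pvDR feld sp W (n + 1) j = if pvCell feld n j = sp then (if j + 1 < W then pvDR feld sp W n (j + 1) + 1 else 1) else 0 := rfl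

lemma pvDL_succ (feld : List (List Int)) (sp : Int) (n j : Nat) :
    pvDL feld sp (n + 1) j = if pvCell feld n j = sp then (if 1 ≤ j then pvDL feld sp n (j - 1) + 1 else 1) else 0 := rfl

lemma pvDRchar (feld : List (List Int)) (sp : Int) (W : Nat) :
    ∀ (n A : Nat), 1 ≤ A → ∀ j, j < W →
      ((A : Int) ≤ pvDR feld sp W (n + 1) j ↔
        (A ≤ n + 1 ∧ j + A ≤ W ∧ ∀ t < A, pvCell feld (n - t) (j + t) = sp)) := by
  intro n
  induction n with
  | zero =>
    intro A hA j hj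
    rw [pvDR_succ]
    constructor
    · intro hle
      simp only [pvDR_zero, zero_add] at hle
      split_ifs at hle with h1 h2 <;> [skip; skip; omega]
      all_goals
        refine ⟨by omega, by omega, ?_⟩
        intro t ht
        have : t = 0 := by omega
        simpa [this] using h1
    · rintro ⟨h1, h2, h3⟩
      have hA1 : A = 1 := by omega
      have := h3 0 (by omega)
      simp only [Nat.sub_zero, Nat.add_zero] at this
      simp [this, hA1, pvDR_zero]
  | succ n ih =>
    intro A hA j hj
    rw [pvDR_succ]
    by_cases hc : pvCell feld (n + 1) j = sp
    · simp only [hc, if_true]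
      by_cases hw : j + 1 < W
      · simp only [hw, if_true]
        by_cases hA1 : A = 1
        · subst hA1
          have := pvDR_nonneg feld sp W (n + 1) (j + 1)
          constructor
          · intro _
            refine ⟨by omega, by omega, ?_⟩
            intro t ht
            have : t = 0 := by omega
            simpa [this] using hc
          · intro _; omega
        · have hA2 : 2 ≤ A := by omega
          have ihh := ih (A - 1) (by omega) (j + 1) hw
          constructor
          · intro hle
            have : ((A - 1 : Nat) : Int) ≤ pvDR feld sp W (n + 1) (j + 1) := by
              push_cast [Nat.cast_sub (by omega : 1 ≤ A)] at *
              omega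
            obtain ⟨g1, g2, g3⟩ := ihh.mp this
            refine ⟨by omega, by omega, ?_⟩
            intro t ht
            match t with
            | 0 => simpa using hc
            | Nat.succ s =>
              have := g3 s (by omega)
              have e1 : n + 1 - (s + 1) = n - s := by omega
              have e2 : j + (s + 1) = j + 1 + s := by omega
              rw [e1, e2]
              exact this
          · rintro ⟨g1, g2, g3⟩
            have : ((A - 1 : Nat) : Int) ≤ pvDR feld sp W (n + 1) (j + 1) := by
              apply ihh.mpr
              refine ⟨by omega, by omega, ?_⟩
              intro s hs
              have := g3 (s + 1) (by omega)
              have e1 : n + 1 - (s + 1) = n - s := by omega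
              have e2 : j + (s + 1) = j + 1 + s := by omega
              rw [e1, e2] at this
              exact this
            push_cast [Nat.cast_sub (by omega : 1 ≤ A)] at this ⊢
            omega
      · simp only [hw, if_false]
        constructor
        · intro hle
          have hA1 : A = 1 := by omega
          refine ⟨by omega, by omega, ?_⟩
          intro t ht
          have : t = 0 := by omega
          simpa [this] using hc
        · rintro ⟨g1, g2, g3⟩
          have : A = 1 := by omega
          omega
    · simp only [hc, if_false]
      constructor
      · intro hle; omega
      · rintro ⟨g1, g2, g3⟩
        have := g3 0 (by omega)
        simp only [Nat.sub_zero, Nat.add_zero] at this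
        exact absurd this hc

lemma pvDLchar (feld : List (List Int)) (sp : Int) :
    ∀ (n A : Nat), 1 ≤ A → ∀ j,
      ((A : Int) ≤ pvDL feld sp (n + 1) j ↔
        (A ≤ n + 1 ∧ A ≤ j + 1 ∧ ∀ t < A, pvCell feld (n - t) (j - t) = sp)) := by
  intro n
  induction n with
  | zero =>
    intro A hA j
    rw [pvDL_succ]
    constructor
    · intro hle
      simp only [pvDL_zero, zero_add] at hle
      split_ifs at hle with h1 h2 <;> [skip; skip; omega]
      all_goals
        refine ⟨by omega, by omega, ?_⟩
        intro t ht
        have : t = 0 := by omega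
        simpa [this] using h1
    · rintro ⟨h1, h2, h3⟩
      have hA1 : A = 1 := by omega
      have := h3 0 (by omega)
      simp only [Nat.sub_zero] at this
      simp [this, hA1, pvDL_zero]
  | succ n ih =>
    intro A hA j
    rw [pvDL_succ]
    by_cases hc : pvCell feld (n + 1) j = sp
    · simp only [hc, if_true]
      by_cases hw : 1 ≤ j
      · simp only [hw, if_true]
        by_cases hA1 : A = 1
        · subst hA1
          have := pvDL_nonneg feld sp (n + 1) (j - 1)
          constructor
          · intro _
            refine ⟨by omega, by omega, ?_⟩
            intro t ht
            have : t = 0 := by omega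
            simpa [this] using hc
          · intro _; omega
        · have hA2 : 2 ≤ A := by omega
          have ihh := ih (A - 1) (by omega) (j - 1)
          constructor
          · intro hle
            have : ((A - 1 : Nat) : Int) ≤ pvDL feld sp (n + 1) (j - 1) := by
              push_cast [Nat.cast_sub (by omega : 1 ≤ A)] at *
              omega
            obtain ⟨g1, g2, g3⟩ := ihh.mp this
            refine ⟨by omega, by omega, ?_⟩
            intro t ht
            match t with
            | 0 => simpa using hc
            | Nat.succ s =>
              have := g3 s (by omega)
              have e1 : n + 1 - (s + 1) = n - s := by omega
              have e2 : j - (s + 1) = j - 1 - s := by omega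
              rw [e1, e2]
              exact this
          · rintro ⟨g1, g2, g3⟩
            have : ((A - 1 : Nat) : Int) ≤ pvDL feld sp (n + 1) (j - 1) := by
              apply ihh.mpr
              refine ⟨by omega, by omega, ?_⟩
              intro s hs
              have := g3 (s + 1) (by omega)
              have e1 : n + 1 - (s + 1) = n - s := by omega
              have e2 : j - (s + 1) = j - 1 - s := by omega
              rw [e1, e2] at this
              exact this
            push_cast [Nat.cast_sub (by omega : 1 ≤ A)] at this ⊢
            omega
      · simp only [hw, if_false]
        constructor
        · intro hle
          have hA1 : A = 1 := by omega
          refine ⟨by omega, by omega, ?_⟩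
          intro t ht
          have : t = 0 := by omega
          simpa [this] using hc
        · rintro ⟨g1, g2, g3⟩
          omega
    · simp only [hc, if_false]
      constructor
      · intro hle; omega
      · rintro ⟨g1, g2, g3⟩
        have := g3 0 (by omega)
        simp only [Nat.sub_zero] at this
        exact absurd this hc

lemma pvWinIff (sp anz : Int) (ha : 1 ≤ anz) (g : Int → Int) :
    ((PySem.List.pyRange 0 anz 1).foldl (fun tmp t => if g t = sp then tmp + 1 else tmp) 0 = anz)
      ↔ (∀ t : Int, 0 ≤ t → t < anz → g t = sp) := by
  rw [PySem.List.foldl_ite_add_one, zero_add]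
  constructor
  · intro hc t ht1 ht2
    have hlen : ((PySem.List.pyRange 0 anz 1).countP fun x => decide (g x = sp)) = (PySem.List.pyRange 0 anz 1).length := by
      rw [PySem.List.length_pyRange_one]
      omega
    have := List.countP_eq_length.mp hlen t (by rw [PySem.List.mem_pyRange_one]; omega)
    simpa using this
  · intro hall
    have hlen : ((PySem.List.pyRange 0 anz 1).countP fun x => decide (g x = sp)) = (PySem.List.pyRange 0 anz 1).length := by
      apply List.countP_eq_length.mpr
      intro t htm
      rw [PySem.List.mem_pyRange_one] at htm
      simpa using hall t htm.1 (by simpa using htm.2)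
    rw [hlen, PySem.List.length_pyRange_one]
    omega

lemma pvExtendBot (F : Nat → Int) (N B : Nat) (hB : 1 ≤ B) (hz : ∀ i, i + 1 < B → F i = 0) :
    ∑ k ∈ Finset.range (N + 1 - B), F (B - 1 + k) = ∑ i ∈ Finset.range N, F i := by
  by_cases hBN : B ≤ N + 1
  · have hsplit : ∑ i ∈ Finset.range N, F i = ∑ i ∈ Finset.range ((B - 1) + (N + 1 - B)), F i := by
      rw [show (B - 1) + (N + 1 - B) = N from by omega]
    rw [hsplit, Finset.sum_range_add, Finset.sum_eq_zero (fun i hi => hz i (by simp at hi; omega)), zero_add]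
  · have h0 : N + 1 - B = 0 := by omega
    rw [h0]
    symm
    simp only [Finset.range_zero, Finset.sum_empty]
    apply Finset.sum_eq_zero
    intro i hi
    simp at hi
    exact hz i (by omega)

lemma pvExtendTop (F : Nat → Int) (N B : Nat) (hB : 1 ≤ B) (hz : ∀ j, N + 1 - B ≤ j → j < N → F j = 0) :
    ∑ j ∈ Finset.range (N + 1 - B), F j = ∑ j ∈ Finset.range N, F j := by
  have hsub : Finset.range (N + 1 - B) ⊆ Finset.range N := by
    intro x hx
    simp only [Finset.mem_range] at *
    omega
  apply Finset.sum_subset hsub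
  intro x hx hnx
  simp only [Finset.mem_range] at hx hnx
  exact hz x (by omega) hx

lemma pvA3 (feld : List (List Int)) (sp anz : Int) (h W : Nat) (ha : 1 ≤ anz) (r : Int) :
    (PySem.List.pyRange ((h : Int) - 1) (anz - 1 - 1) (-1)).foldl (fun ret i =>
      (PySem.List.pyRange 0 ((W : Int) - (anz - 1)) 1).foldl (fun ret j =>
        let tmp : Int := (PySem.List.pyRange 0 anz 1).foldl (fun tmp t =>
          if PySem.List.pyGetD (PySem.List.pyGetD feld (i - t) []) (j + t) 0 = sp then tmp + 1 else tmp) 0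
        if tmp = anz then ret + 1 else ret) ret) r
    = r + ∑ i ∈ Finset.range h, ∑ j ∈ Finset.range W, pvInd anz (pvDR feld sp W (i + 1) j) := by
  rw [PySem.List.foldl_congr_mem (g := fun ret i => ret +
        ∑ l ∈ Finset.range (W + 1 - anz.toNat),
          (if (∀ t : Int, 0 ≤ t → t < anz → PySem.List.pyGetD (PySem.List.pyGetD feld (i - t) []) ((l : Int) + t) 0 = sp) then (1:Int) else 0))
      (init := r)]
  · rw [PySem.List.foldl_add, PySem.List.pyRange_neg_one_eq_reverse, List.map_reverse, List.sum_reverse, pvSumAsc]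
    congr 1
    have hA1 : 1 ≤ anz.toNat := by omega
    have hn : ((h : Int) - 1 + 1 - (anz - 1 - 1 + 1)).toNat = h + 1 - anz.toNat := by omega
    rw [hn,
      ← pvExtendBot (fun i => ∑ j ∈ Finset.range W, pvInd anz (pvDR feld sp W (i + 1) j)) h anz.toNat hA1
        (fun i hi => Finset.sum_eq_zero (fun j hj => by
          simp only [Finset.mem_range] at hj
          have hch := pvDRchar feld sp W i anz.toNat hA1 j hj
          simp only [pvInd, ge_iff_le]
          rw [if_neg]
          intro hle
          have : (anz.toNat : Int) ≤ pvDR feld sp W (i + 1) j := by omega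
          exact absurd (hch.mp this).1 (by omega)))]
    apply Finset.sum_congr rfl
    intro k hk
    simp only [Finset.mem_range] at hk
    dsimp only
    rw [← pvExtendTop (fun j => pvInd anz (pvDR feld sp W ((anz.toNat - 1 + k) + 1) j)) W anz.toNat hA1
        (fun j hjz hjW => by
          have hch := pvDRchar feld sp W (anz.toNat - 1 + k) anz.toNat hA1 j hjW
          simp only [pvInd, ge_iff_le]
          rw [if_neg]
          intro hle
          have : (anz.toNat : Int) ≤ pvDR feld sp W (anz.toNat - 1 + k + 1) j := by omega
          exact absurd (hch.mp this).2.1 (by omega))]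
    apply Finset.sum_congr rfl
    intro l hl
    simp only [Finset.mem_range] at hl
    have hlW : l < W := by omega
    have hiff : (∀ t : Int, 0 ≤ t → t < anz →
          PySem.List.pyGetD (PySem.List.pyGetD feld (anz - 1 - 1 + 1 + (k : Int) - t) []) ((l : Int) + t) 0 = sp)
        ↔ (∀ tN, tN < anz.toNat → pvCell feld (anz.toNat - 1 + k - tN) (l + tN) = sp) := by
      constructor
      · intro hall tN htN
        have := hall (tN : Int) (by omega) (by omega)
        rw [show anz - 1 - 1 + 1 + (k : Int) - (tN : Int) = ((anz.toNat - 1 + k - tN : Nat) : Int) by omega,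
          show (l : Int) + (tN : Int) = ((l + tN : Nat) : Int) by push_cast; ring] at this
        rw [PySem.List.pyGetD_natCast, PySem.List.pyGetD_natCast] at this
        simpa [pvCell] using this
      · intro hall t ht1 ht2
        obtain ⟨tN, rfl⟩ := Int.eq_ofNat_of_zero_le ht1
        have := hall tN (by omega)
        rw [show anz - 1 - 1 + 1 + (k : Int) - (tN : Int) = ((anz.toNat - 1 + k - tN : Nat) : Int) by omega,
          show (l : Int) + (tN : Int) = ((l + tN : Nat) : Int) by push_cast; ring]
        rw [PySem.List.pyGetD_natCast, PySem.List.pyGetD_natCast]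
        simpa [pvCell] using this
    rw [if_congr hiff rfl rfl]
    have hch := pvDRchar feld sp W (anz.toNat - 1 + k) anz.toNat hA1 l hlW
    by_cases hwin : ∀ tN, tN < anz.toNat → pvCell feld (anz.toNat - 1 + k - tN) (l + tN) = sp
    · rw [if_pos hwin]
      have : (anz.toNat : Int) ≤ pvDR feld sp W (anz.toNat - 1 + k + 1) l :=
        hch.mpr ⟨by omega, by omega, hwin⟩
      simp only [pvInd, ge_iff_le]
      rw [if_pos (by omega)]
    · rw [if_neg hwin]
      simp only [pvInd, ge_iff_le]
      rw [if_neg]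
      intro hle
      have : (anz.toNat : Int) ≤ pvDR feld sp W (anz.toNat - 1 + k + 1) l := by omega
      exact hwin (hch.mp this).2.2
  · intro acc x hx
    rw [PySem.List.foldl_congr_mem (g := fun ret j => ret +
          (if (∀ t : Int, 0 ≤ t → t < anz → PySem.List.pyGetD (PySem.List.pyGetD feld (x - t) []) (j + t) 0 = sp) then (1:Int) else 0))
        (init := acc)]
    · rw [PySem.List.foldl_add, pvSumAsc]
      congr 1
      have hm : ((W : Int) - (anz - 1) - 0).toNat = W + 1 - anz.toNat := by omega
      rw [hm]
      apply Finset.sum_congr rfl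
      intro l _
      simp only [zero_add]
    · intro acc2 j hj
      dsimp only
      rw [if_congr (pvWinIff sp anz ha (fun t => PySem.List.pyGetD (PySem.List.pyGetD feld (x - t) []) (j + t) 0)) rfl rfl]
      split_ifs <;> ring

lemma pvA4 (feld : List (List Int)) (sp anz : Int) (h W : Nat) (ha : 1 ≤ anz) (r : Int) :
    (PySem.List.pyRange ((h : Int) - 1) (anz - 1 - 1) (-1)).foldl (fun ret i =>
      (PySem.List.pyRange ((W : Int) - 1) (anz - 1 - 1) (-1)).foldl (fun ret j =>
        let tmp : Int := (PySem.List.pyRange 0 anz 1).foldl (fun tmp t =>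
          if PySem.List.pyGetD (PySem.List.pyGetD feld (i - t) []) (j - t) 0 = sp then tmp + 1 else tmp) 0
        if tmp = anz then ret + 1 else ret) ret) r
    = r + ∑ i ∈ Finset.range h, ∑ j ∈ Finset.range W, pvInd anz (pvDL feld sp (i + 1) j) := by
  rw [PySem.List.foldl_congr_mem (g := fun ret i => ret +
        ∑ l ∈ Finset.range (W + 1 - anz.toNat),
          (if (∀ t : Int, 0 ≤ t → t < anz → PySem.List.pyGetD (PySem.List.pyGetD feld (i - t) []) (anz - 1 - 1 + 1 + (l : Int) - t) 0 = sp) then (1:Int) else 0))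
      (init := r)]
  · rw [PySem.List.foldl_add, PySem.List.pyRange_neg_one_eq_reverse, List.map_reverse, List.sum_reverse, pvSumAsc]
    congr 1
    have hA1 : 1 ≤ anz.toNat := by omega
    have hn : ((h : Int) - 1 + 1 - (anz - 1 - 1 + 1)).toNat = h + 1 - anz.toNat := by omega
    rw [hn,
      ← pvExtendBot (fun i => ∑ j ∈ Finset.range W, pvInd anz (pvDL feld sp (i + 1) j)) h anz.toNat hA1
        (fun i hi => Finset.sum_eq_zero (fun j hj => by
          simp only [Finset.mem_range] at hj
          have hch := pvDLchar feld sp i anz.toNat hA1 j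
          simp only [pvInd, ge_iff_le]
          rw [if_neg]
          intro hle
          have : (anz.toNat : Int) ≤ pvDL feld sp (i + 1) j := by omega
          exact absurd (hch.mp this).1 (by omega)))]
    apply Finset.sum_congr rfl
    intro k hk
    simp only [Finset.mem_range] at hk
    dsimp only
    rw [← pvExtendBot (fun j => pvInd anz (pvDL feld sp ((anz.toNat - 1 + k) + 1) j)) W anz.toNat hA1
        (fun j hjz => by
          have hch := pvDLchar feld sp (anz.toNat - 1 + k) anz.toNat hA1 j
          simp only [pvInd, ge_iff_le]
          rw [if_neg]
          intro hle
          have : (anz.toNat : Int) ≤ pvDL feld sp (anz.toNat - 1 + k + 1) j := by omega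
          exact absurd (hch.mp this).2.1 (by omega))]
    apply Finset.sum_congr rfl
    intro l hl
    simp only [Finset.mem_range] at hl
    have hiff : (∀ t : Int, 0 ≤ t → t < anz →
          PySem.List.pyGetD (PySem.List.pyGetD feld (anz - 1 - 1 + 1 + (k : Int) - t) []) (anz - 1 - 1 + 1 + (l : Int) - t) 0 = sp)
        ↔ (∀ tN, tN < anz.toNat → pvCell feld (anz.toNat - 1 + k - tN) (anz.toNat - 1 + l - tN) = sp) := by
      constructor
      · intro hall tN htN
        have := hall (tN : Int) (by omega) (by omega)
        rw [show anz - 1 - 1 + 1 + (k : Int) - (tN : Int) = ((anz.toNat - 1 + k - tN : Nat) : Int) by omega,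
          show anz - 1 - 1 + 1 + (l : Int) - (tN : Int) = ((anz.toNat - 1 + l - tN : Nat) : Int) by omega] at this
        rw [PySem.List.pyGetD_natCast, PySem.List.pyGetD_natCast] at this
        simpa [pvCell] using this
      · intro hall t ht1 ht2
        obtain ⟨tN, rfl⟩ := Int.eq_ofNat_of_zero_le ht1
        have := hall tN (by omega)
        rw [show anz - 1 - 1 + 1 + (k : Int) - (tN : Int) = ((anz.toNat - 1 + k - tN : Nat) : Int) by omega,
          show anz - 1 - 1 + 1 + (l : Int) - (tN : Int) = ((anz.toNat - 1 + l - tN : Nat) : Int) by omega]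
        rw [PySem.List.pyGetD_natCast, PySem.List.pyGetD_natCast]
        simpa [pvCell] using this
    rw [if_congr hiff rfl rfl]
    have hch := pvDLchar feld sp (anz.toNat - 1 + k) anz.toNat hA1 (anz.toNat - 1 + l)
    by_cases hwin : ∀ tN, tN < anz.toNat → pvCell feld (anz.toNat - 1 + k - tN) (anz.toNat - 1 + l - tN) = sp
    · rw [if_pos hwin]
      have : (anz.toNat : Int) ≤ pvDL feld sp (anz.toNat - 1 + k + 1) (anz.toNat - 1 + l) :=
        hch.mpr ⟨by omega, by omega, hwin⟩
      simp only [pvInd, ge_iff_le]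
      rw [if_pos (by omega)]
    · rw [if_neg hwin]
      simp only [pvInd, ge_iff_le]
      rw [if_neg]
      intro hle
      have : (anz.toNat : Int) ≤ pvDL feld sp (anz.toNat - 1 + k + 1) (anz.toNat - 1 + l) := by omega
      exact hwin (hch.mp this).2.2
  · intro acc x hx
    rw [PySem.List.foldl_congr_mem (g := fun ret j => ret +
          (if (∀ t : Int, 0 ≤ t → t < anz → PySem.List.pyGetD (PySem.List.pyGetD feld (x - t) []) (j - t) 0 = sp) then (1:Int) else 0))
        (init := acc)]
    · rw [PySem.List.foldl_add, PySem.List.pyRange_neg_one_eq_reverse, List.map_reverse, List.sum_reverse, pvSumAsc]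
      congr 1
      have hm : ((W : Int) - 1 + 1 - (anz - 1 - 1 + 1)).toNat = W + 1 - anz.toNat := by omega
      rw [hm]
    · intro acc2 j hj
      dsimp only
      rw [if_congr (pvWinIff sp anz ha (fun t => PySem.List.pyGetD (PySem.List.pyGetD feld (x - t) []) (j - t) 0)) rfl rfl]
      split_ifs <;> ring


lemma pvLA (feld : List (List Int)) (sp anz : Int) (ha : 1 ≤ anz) :
    check feld sp anz = pvT feld sp anz feld.length (feld.headD []).length := by
  have hW : PySem.List.pyGetD feld 0 [] = feld.headD [] := by
    rcases feld with _ | ⟨r0, rest⟩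
    · rfl
    · simp [PySem.List.pyGetD_ofNat']
  simp only [check, PySem.List.len_eq, hW]
  rw [pvA1 feld sp anz feld.length (feld.headD []).length 0,
    pvA2 feld sp anz feld.length (feld.headD []).length,
    pvA3 feld sp anz feld.length (feld.headD []).length ha,
    pvA4 feld sp anz feld.length (feld.headD []).length ha]
  simp only [pvT, Finset.sum_add_distrib]
  rw [show (∑ j ∈ Finset.range (feld.headD []).length, ∑ i ∈ Finset.range feld.length,
        pvInd anz (pvV feld sp (i + 1) j))
      = (∑ i ∈ Finset.range feld.length, ∑ j ∈ Finset.range (feld.headD []).length,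
        pvInd anz (pvV feld sp (i + 1) j)) from Finset.sum_comm]
  ring

lemma pvV_succ (feld : List (List Int)) (sp : Int) (n j : Nat) :
    pvV feld sp (n + 1) j = if pvCell feld n j = sp then pvV feld sp n j + 1 else 0 := rfl

lemma pvR_succ (sp : Int) (f : Nat → Int) (m : Nat) :
    pvR sp f (m + 1) = if f m = sp then pvR sp f m + 1 else 0 := rfl

lemma pvFoldIdx {α β : Type} (l : List α) (f : β → α → β) (d : α) (init : β) :
    l.foldl f init = (List.range l.length).foldl (fun acc k => f acc (l.getD k d)) init := by
  induction l using List.reverseRecOn generalizing init with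
  | nil => rfl
  | append_singleton l x ih =>
    rw [List.foldl_append, ih, List.length_append, List.length_singleton, List.range_succ,
      List.foldl_append]
    simp only [List.foldl_cons, List.foldl_nil]
    have h1 : (l ++ [x]).getD l.length d = x := by
      rw [List.getD_append_right l [x] d l.length (le_refl _)]
      simp
    rw [h1]
    congr 1
    apply PySem.List.foldl_congr_mem
    intro acc k hk
    rw [List.mem_range] at hk
    rw [List.getD_append l [x] d k hk]

set_option maxHeartbeats 1600000 in
lemma pvInner (feld : List (List Int)) (sp anz : Int) (W n : Nat) :
    ∀ (m : Nat), m ≤ W → ∀ (c : Int),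
    (PySem.List.pyRange 0 (m : Int) 1).foldl
      (fun (q : (List Int × List Int × List Int) × Int × Int) j =>
        let run : Int := q.2.1
        let abc : Int × Int × Int × Int :=
          if PySem.List.pyGetD (feld.getD n []) j 0 = sp then
            (run + 1, PySem.List.pyGetD ((List.range W).map (fun j' => pvV feld sp n j')) j 0 + 1,
             if j + 1 < (W : Int) then PySem.List.pyGetD ((List.range W).map (fun j' => pvDR feld sp W n j')) (j + 1) 0 + 1 else 1,
             if j ≥ 1 then PySem.List.pyGetD ((List.range W).map (fun j' => pvDL feld sp n j')) (j - 1) 0 + 1 else 1)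
          else (0, 0, 0, 0)
        let t1 : Int := if abc.1 ≥ anz then q.2.2 + 1 else q.2.2
        let t2 : Int := if abc.2.1 ≥ anz then t1 + 1 else t1
        let t3 : Int := if abc.2.2.1 ≥ anz then t2 + 1 else t2
        let t4 : Int := if abc.2.2.2 ≥ anz then t3 + 1 else t3
        ((q.1.1 ++ [abc.2.1], q.1.2.1 ++ [abc.2.2.1], q.1.2.2 ++ [abc.2.2.2]), abc.1, t4))
      (([], [], []), 0, c)
    = (((List.range m).map (fun j' => pvV feld sp (n + 1) j'),
        (List.range m).map (fun j' => pvDR feld sp W (n + 1) j'),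
        (List.range m).map (fun j' => pvDL feld sp (n + 1) j')),
       pvR sp (pvCell feld n) m,
       c + ∑ p ∈ Finset.range m,
         (pvInd anz (pvR sp (pvCell feld n) (p + 1)) + pvInd anz (pvV feld sp (n + 1) p)
           + pvInd anz (pvDR feld sp W (n + 1) p) + pvInd anz (pvDL feld sp (n + 1) p))) := by
  intro m
  induction m with
  | zero =>
    intro _ c
    simp [PySem.List.pyRange_one_eq_nil, pvR]
  | succ m ih =>
    intro hm c
    rw [show ((m + 1 : Nat) : Int) = (m : Int) + 1 by push_cast; ring,
      PySem.List.pyRange_one_succ_right (by positivity), List.foldl_append, ih (by omega) c]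
    simp only [List.foldl_cons, List.foldl_nil]
    have hrow : PySem.List.pyGetD (feld.getD n []) (m : Int) 0 = pvCell feld n m := by
      simp [pvCell, PySem.List.pyGetD_natCast]
    have hv : PySem.List.pyGetD ((List.range W).map (fun j' => pvV feld sp n j')) (m : Int) 0
        = pvV feld sp n m := by
      rw [PySem.List.pyGetD_natCast]
      exact PySem.List.getD_map_range _ _ _ _ (by omega)
    rw [hrow, hv]
    have harr : ∀ (g : Nat → Int), (List.range m).map g ++ [g m] = (List.range (m + 1)).map g := by
      intro g
      rw [List.range_succ, List.map_append]
      rfl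
    by_cases hc : pvCell feld n m = sp
    · simp only [hc, if_true]
      by_cases hw : m + 1 < W
      · have hwi : ((m : Int) + 1 < (W : Int)) := by omega
        have hdr : PySem.List.pyGetD ((List.range W).map (fun j' => pvDR feld sp W n j')) ((m : Int) + 1) 0
            = pvDR feld sp W n (m + 1) := by
          rw [show (m : Int) + 1 = ((m + 1 : Nat) : Int) by push_cast; ring, PySem.List.pyGetD_natCast]
          exact PySem.List.getD_map_range _ _ _ _ (by omega)
        rw [if_pos hwi, hdr]
        by_cases h1 : 1 ≤ m
        · have h1i : ((m : Int) ≥ 1) := by omega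
          have hdl : PySem.List.pyGetD ((List.range W).map (fun j' => pvDL feld sp n j')) ((m : Int) - 1) 0
              = pvDL feld sp n (m - 1) := by
            rw [show (m : Int) - 1 = ((m - 1 : Nat) : Int) by omega, PySem.List.pyGetD_natCast]
            exact PySem.List.getD_map_range _ _ _ _ (by omega)
          rw [if_pos h1i, hdl]
          refine congrArg₂ Prod.mk (congrArg₂ Prod.mk ?_ (congrArg₂ Prod.mk ?_ ?_)) (congrArg₂ Prod.mk ?_ ?_)
          · rw [← harr, pvV_succ, if_pos hc]
          · rw [← harr, pvDR_succ, if_pos hc, if_pos hw]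
          · rw [← harr, pvDL_succ, if_pos hc, if_pos h1]
          · rw [pvR_succ, if_pos hc]
          · rw [Finset.sum_range_succ, pvR_succ, pvV_succ, pvDR_succ, pvDL_succ,
              if_pos hc, if_pos hc, if_pos hc, if_pos hc, if_pos hw, if_pos h1]
            simp only [pvInd]
            split_ifs <;> ring
        · have h1i : ¬ ((m : Int) ≥ 1) := by omega
          have hm0 : m = 0 := by omega
          rw [if_neg h1i]
          refine congrArg₂ Prod.mk (congrArg₂ Prod.mk ?_ (congrArg₂ Prod.mk ?_ ?_)) (congrArg₂ Prod.mk ?_ ?_)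
          · rw [← harr, pvV_succ, if_pos hc]
          · rw [← harr, pvDR_succ, if_pos hc, if_pos hw]
          · rw [← harr, pvDL_succ, if_pos hc, if_neg (by omega : ¬ 1 ≤ m)]
          · rw [pvR_succ, if_pos hc]
          · rw [Finset.sum_range_succ, pvR_succ, pvV_succ, pvDR_succ, pvDL_succ,
              if_pos hc, if_pos hc, if_pos hc, if_pos hc, if_pos hw, if_neg (by omega : ¬ 1 ≤ m)]
            simp only [pvInd]
            split_ifs <;> ring
      · have hwi : ¬ ((m : Int) + 1 < (W : Int)) := by omega
        rw [if_neg hwi]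
        by_cases h1 : 1 ≤ m
        · have h1i : ((m : Int) ≥ 1) := by omega
          have hdl : PySem.List.pyGetD ((List.range W).map (fun j' => pvDL feld sp n j')) ((m : Int) - 1) 0
              = pvDL feld sp n (m - 1) := by
            rw [show (m : Int) - 1 = ((m - 1 : Nat) : Int) by omega, PySem.List.pyGetD_natCast]
            exact PySem.List.getD_map_range _ _ _ _ (by omega)
          rw [if_pos h1i, hdl]
          refine congrArg₂ Prod.mk (congrArg₂ Prod.mk ?_ (congrArg₂ Prod.mk ?_ ?_)) (congrArg₂ Prod.mk ?_ ?_)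
          · rw [← harr, pvV_succ, if_pos hc]
          · rw [← harr, pvDR_succ, if_pos hc, if_neg hw]
          · rw [← harr, pvDL_succ, if_pos hc, if_pos h1]
          · rw [pvR_succ, if_pos hc]
          · rw [Finset.sum_range_succ, pvR_succ, pvV_succ, pvDR_succ, pvDL_succ,
              if_pos hc, if_pos hc, if_pos hc, if_pos hc, if_neg hw, if_pos h1]
            simp only [pvInd]
            split_ifs <;> ring
        · have h1i : ¬ ((m : Int) ≥ 1) := by omega
          rw [if_neg h1i]
          refine congrArg₂ Prod.mk (congrArg₂ Prod.mk ?_ (congrArg₂ Prod.mk ?_ ?_)) (congrArg₂ Prod.mk ?_ ?_)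
          · rw [← harr, pvV_succ, if_pos hc]
          · rw [← harr, pvDR_succ, if_pos hc, if_neg hw]
          · rw [← harr, pvDL_succ, if_pos hc, if_neg (by omega : ¬ 1 ≤ m)]
          · rw [pvR_succ, if_pos hc]
          · rw [Finset.sum_range_succ, pvR_succ, pvV_succ, pvDR_succ, pvDL_succ,
              if_pos hc, if_pos hc, if_pos hc, if_pos hc, if_neg hw, if_neg (by omega : ¬ 1 ≤ m)]
            simp only [pvInd]
            split_ifs <;> ring
    · simp only [hc, if_false]
      refine congrArg₂ Prod.mk (congrArg₂ Prod.mk ?_ (congrArg₂ Prod.mk ?_ ?_)) (congrArg₂ Prod.mk ?_ ?_)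
      · rw [← harr, pvV_succ, if_neg hc]
      · rw [← harr, pvDR_succ, if_neg hc]
      · rw [← harr, pvDL_succ, if_neg hc]
      · rw [pvR_succ, if_neg hc]
      · rw [Finset.sum_range_succ, pvR_succ, pvV_succ, pvDR_succ, pvDL_succ,
          if_neg hc, if_neg hc, if_neg hc, if_neg hc]
        simp only [pvInd]
        split_ifs <;> ring

lemma pvMapZero (W : Nat) (f : Nat → Int) (hf : ∀ j, f j = 0) :
    (List.range W).map f = List.replicate W 0 := by
  apply List.ext_getElem
  · simp
  · intro i h1 h2
    simp [hf]

set_option maxHeartbeats 1600000 in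
lemma pvOuter (feld : List (List Int)) (sp anz : Int) (W : Nat) :
    ∀ (n : Nat),
    (List.range n).foldl
      (fun (st : (List Int × List Int × List Int) × Int) k =>
        let v := st.1.1
        let dr := st.1.2.1
        let dl := st.1.2.2
        let inner := (PySem.List.pyRange 0 (W : Int) 1).foldl
          (fun (q : (List Int × List Int × List Int) × Int × Int) j =>
            let run : Int := q.2.1
            let abc : Int × Int × Int × Int :=
              if PySem.List.pyGetD (feld.getD k []) j 0 = sp then
                (run + 1, PySem.List.pyGetD v j 0 + 1,
                 if j + 1 < (W : Int) then PySem.List.pyGetD dr (j + 1) 0 + 1 else 1,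
                 if j ≥ 1 then PySem.List.pyGetD dl (j - 1) 0 + 1 else 1)
              else (0, 0, 0, 0)
            let t1 : Int := if abc.1 ≥ anz then q.2.2 + 1 else q.2.2
            let t2 : Int := if abc.2.1 ≥ anz then t1 + 1 else t1
            let t3 : Int := if abc.2.2.1 ≥ anz then t2 + 1 else t2
            let t4 : Int := if abc.2.2.2 ≥ anz then t3 + 1 else t3
            ((q.1.1 ++ [abc.2.1], q.1.2.1 ++ [abc.2.2.1], q.1.2.2 ++ [abc.2.2.2]), abc.1, t4))
          (([], [], []), 0, st.2)
        (inner.1, inner.2.2))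
      ((List.replicate W 0, List.replicate W 0, List.replicate W 0), 0)
    = (((List.range W).map (fun j' => pvV feld sp n j'),
        (List.range W).map (fun j' => pvDR feld sp W n j'),
        (List.range W).map (fun j' => pvDL feld sp n j')),
       ∑ i ∈ Finset.range n, ∑ j ∈ Finset.range W,
         (pvInd anz (pvR sp (pvCell feld i) (j + 1)) + pvInd anz (pvV feld sp (i + 1) j)
           + pvInd anz (pvDR feld sp W (i + 1) j) + pvInd anz (pvDL feld sp (i + 1) j))) := by
  intro n
  induction n with
  | zero =>
    simp only [List.range_zero, List.foldl_nil, Finset.range_zero, Finset.sum_empty]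
    rw [pvMapZero W (fun j' => pvV feld sp 0 j') (fun j => rfl),
      pvMapZero W (fun j' => pvDR feld sp W 0 j') (fun j => rfl),
      pvMapZero W (fun j' => pvDL feld sp 0 j') (fun j => rfl)]
  | succ n ih =>
    rw [List.range_succ, List.foldl_append, ih]
    simp only [List.foldl_cons, List.foldl_nil]
    rw [pvInner feld sp anz W n W (le_refl W)]
    rw [Finset.sum_range_succ]

lemma pvLB (feld : List (List Int)) (sp anz : Int) :
    check_alt feld sp anz = pvT feld sp anz feld.length (feld.headD []).length := by
  have hW : PySem.List.pyGetD feld 0 [] = feld.headD [] := by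
    rcases feld with _ | ⟨r0, rest⟩
    · rfl
    · simp [PySem.List.pyGetD_ofNat']
  simp only [check_alt, PySem.List.len_eq, hW, Int.toNat_natCast]
  rw [pvFoldIdx feld _ [] _]
  rw [pvOuter feld sp anz (feld.headD []).length feld.length]
  rfl

-- ===== VERDICT (by name: the statement is the Claim_ definition above) =====
theorem check_spec : Claim_equal_check := by
  intro feld sp anz hdom hpre
  unfold Spec_check
  rw [pvLA feld sp anz hpre.2.1, pvLB feld sp anz]
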